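-- pv_equiv track=rewrite | github.com/TheRealCubeAD/BANDO | Alex' Projekte/Brainfire/Prototyp_Brainfire.py | laufen
-- ===== SOURCE A (Python) =====
-- feldBreite = 8 # > 0
--
-- feldHoehe = 8 # > 0
--
-- def getZelle(matrix,pos):
--     return matrix[pos[1]][pos[0]]
--
-- def laufen(level,pos,richtung):
--     iRichtung = {"up":(0,-1),"down":(0,1),"left":(-1,0),"right":(1,0)}
--     ix,iy = iRichtung[richtung]
--     npos = [pos[0] + ix, pos[1] + iy]
--     if npos[0] not in range(feldBreite) or npos[1] not in range(feldHoehe):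
--         return pos
--     elif getZelle(level,npos) == 1:
--         return pos
--     else:
--         return laufen(level,npos,richtung)
-- ===== SOURCE B (Python) =====
-- feldBreite = 8 # > 0
--
-- feldHoehe = 8 # > 0
--
-- def laufen(level, pos, richtung):
--     ix, iy = {"up": (0, -1), "down": (0, 1), "left": (-1, 0), "right": (1, 0)}[richtung]
--     x, y = pos[0], pos[1]
--     k = 0
--     while (0 <= x + (k + 1) * ix < feldBreite
--            and 0 <= y + (k + 1) * iy < feldHoehe
--            and level[y + (k + 1) * iy][x + (k + 1) * ix] != 1):
--         k += 1
--     return pos if k == 0 else [x + k * ix, y + k * iy]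
-- ===== Notes on version B (the rewrite author's own statement) =====
-- stated objective: alternative
-- what changed: Replaced A's tail recursion that rebuilds and passes a new position list each call by an iterative step counter k with the final cell computed in closed form as [x + k*ix, y + k*iy] (returning the original pos object when k == 0).
-- outside the precondition, e.g. on laufen([[0, 1]], [0, 0], 'right'): A returns [0, 0], B returns [0, 0]
import Mathlib
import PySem

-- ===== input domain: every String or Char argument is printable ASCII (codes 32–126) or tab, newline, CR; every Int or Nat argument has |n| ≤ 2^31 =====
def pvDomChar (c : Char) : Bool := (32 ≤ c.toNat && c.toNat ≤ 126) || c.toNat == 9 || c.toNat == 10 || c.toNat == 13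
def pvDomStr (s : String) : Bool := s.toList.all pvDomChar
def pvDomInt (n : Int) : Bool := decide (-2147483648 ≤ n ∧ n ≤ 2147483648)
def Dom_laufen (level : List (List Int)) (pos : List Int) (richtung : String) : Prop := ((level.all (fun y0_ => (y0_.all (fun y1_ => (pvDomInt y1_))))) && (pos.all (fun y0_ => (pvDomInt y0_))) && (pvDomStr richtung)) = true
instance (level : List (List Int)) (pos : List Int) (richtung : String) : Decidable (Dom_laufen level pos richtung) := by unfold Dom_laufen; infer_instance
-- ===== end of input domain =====

-- B replaces A's tail recursion (which rebuilds a fresh position list each call) by an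
-- iterative step counter with the final cell computed in closed form; same cost, different decomposition.


-- shared index helpers: Python xs[i]; the default branch is unreachable inside Pre_laufen
def pyAt (xs : List Int) (i : Int) : Int := PySem.List.pyGetD xs i 0
def rowAt (m : List (List Int)) (i : Int) : List Int := PySem.List.pyGetD m i []
-- direction table {"up":(0,-1),"down":(0,1),"left":(-1,0),"right":(1,0)}; KeyError excluded by Pre_laufen
def iRichtung : PySem.Dict String (Int × Int) :=
  PySem.Dict.ofList [("up", (0, -1)), ("down", (0, 1)), ("left", (-1, 0)), ("right", (1, 0))]

-- ===== PORT A =====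
def getZelle (matrix : List (List Int)) (pos : List Int) : Int :=
  pyAt (rowAt matrix (pyAt pos 1)) (pyAt pos 0)

-- fuel only makes the recursion total; inside Pre_laufen the depth is ≤ 9, so fuel 20 is never exhausted
def laufenRec (level : List (List Int)) (ix iy : Int) : List Int → Nat → List Int
  | pos, 0 => pos
  | pos, Nat.succ f =>
    let npos : List Int := [pyAt pos 0 + ix, pyAt pos 1 + iy]
    if ¬(0 ≤ pyAt npos 0 ∧ pyAt npos 0 < 8) ∨ ¬(0 ≤ pyAt npos 1 ∧ pyAt npos 1 < 8) then pos
    else if getZelle level npos == 1 then pos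
    else laufenRec level ix iy npos f

def laufen (level : List (List Int)) (pos : List Int) (richtung : String) : List Int :=
  let d := (PySem.Dict.get? iRichtung richtung).getD (0, 0)
  laufenRec level d.1 d.2 pos 20

-- ===== PORT B =====
-- the while-loop of Source B: count how many steps k the walk can take
def countSteps (level : List (List Int)) (x y ix iy : Int) : Int → Nat → Int
  | k, 0 => k
  | k, Nat.succ f =>
    if 0 ≤ x + (k + 1) * ix ∧ x + (k + 1) * ix < 8 ∧
       0 ≤ y + (k + 1) * iy ∧ y + (k + 1) * iy < 8 ∧
       pyAt (rowAt level (y + (k + 1) * iy)) (x + (k + 1) * ix) ≠ 1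
    then countSteps level x y ix iy (k + 1) f
    else k

def laufen_alt (level : List (List Int)) (pos : List Int) (richtung : String) : List Int :=
  let d := (PySem.Dict.get? iRichtung richtung).getD (0, 0)
  let x := pyAt pos 0
  let y := pyAt pos 1
  let k := countSteps level x y d.1 d.2 0 20
  if k = 0 then pos else [x + k * d.1, y + k * d.2]

-- ===== PRECONDITION & SPEC =====
def dirX (richtung : String) : Int := if richtung = "left" then -1 else if richtung = "right" then 1 else 0
def dirY (richtung : String) : Int := if richtung = "up" then -1 else if richtung = "down" then 1 else 0

-- Pre_ excludes inputs where Python A raises: a richtung outside the four keys (KeyError), pos with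
-- fewer than 2 entries (IndexError), and — unless the very first step already leaves the 8x8 board —
-- levels smaller than 8x8, where whether A raises an IndexError depends on the walk itself and
-- cannot be stated without re-simulating it (on some such inputs A returns; see claim cites).
def Pre_laufen (level : List (List Int)) (pos : List Int) (richtung : String) : Prop :=
  (richtung = "up" ∨ richtung = "down" ∨ richtung = "left" ∨ richtung = "right") ∧
  2 ≤ pos.length ∧
  (¬(0 ≤ pyAt pos 0 + dirX richtung ∧ pyAt pos 0 + dirX richtung < 8 ∧
      0 ≤ pyAt pos 1 + dirY richtung ∧ pyAt pos 1 + dirY richtung < 8) ∨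
   (8 ≤ level.length ∧ ∀ r ∈ level.take 8, 8 ≤ r.length))
instance (level : List (List Int)) (pos : List Int) (richtung : String) : Decidable (Pre_laufen level pos richtung) := by unfold Pre_laufen; infer_instance

def pvWitness_laufen : List (List Int) × List Int × String :=
  ([[0,0,0,0,0,0,0,0],[0,0,0,0,0,0,0,0],[0,0,0,0,0,0,0,0],[0,0,0,0,0,0,0,0],
    [0,0,0,0,0,0,0,0],[0,0,0,0,0,0,0,0],[0,0,0,0,0,0,0,0],[0,0,0,0,0,0,0,0]],
   [0, 0], "right")

def Spec_laufen (level : List (List Int)) (pos : List Int) (richtung : String) (out : List Int) : Prop := out = laufen_alt level pos richtung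
instance (level : List (List Int)) (pos : List Int) (richtung : String) (out : List Int) : Decidable (Spec_laufen level pos richtung out) := by unfold Spec_laufen; infer_instance

-- ===== CLAIM (what is proved, stated in full; the proofs are below) =====
def Claim_equal_laufen : Prop := ∀ (level : List (List Int)) (pos : List Int) (richtung : String), Dom_laufen level pos richtung → Pre_laufen level pos richtung → Spec_laufen level pos richtung (laufen level pos richtung)

-- ===== LEMMAS AND PROOFS =====

-- the counter never goes below its accumulator
theorem countSteps_ge (level : List (List Int)) (x y ix iy : Int) :
    ∀ (f : Nat) (k : Int), k ≤ countSteps level x y ix iy k f := by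
  intro f
  induction f with
  | zero => intro k; simp [countSteps]
  | succ f ih =>
    intro k
    simp only [countSteps]
    split_ifs with h
    · exact le_trans (by omega) (ih (k + 1))
    · exact le_refl k

-- shift the accumulator out of countSteps
theorem countSteps_shift (level : List (List Int)) (ix iy : Int) :
    ∀ (f : Nat) (k x y : Int),
      countSteps level x y ix iy k f = k + countSteps level (x + k * ix) (y + k * iy) ix iy 0 f := by
  intro f
  induction f with
  | zero => intro k x y; simp [countSteps]
  | succ f ih =>
    intro k x y
    have hx : x + k * ix + (0 + 1) * ix = x + (k + 1) * ix := by ring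
    have hy : y + k * iy + (0 + 1) * iy = y + (k + 1) * iy := by ring
    simp only [countSteps, hx, hy]
    split_ifs with h
    · rw [ih (k + 1) x y, ih (0 + 1) (x + k * ix) (y + k * iy)]
      have hx' : x + k * ix + (0 + 1) * ix = x + (k + 1) * ix := by ring
      have hy' : y + k * iy + (0 + 1) * iy = y + (k + 1) * iy := by ring
      rw [hx', hy']
      ring
    · ring

-- the recursion of port A computes the closed form of port B, fuel for fuel
theorem laufenRec_eq_count (level : List (List Int)) (ix iy : Int) :
    ∀ (f : Nat) (pos : List Int),
      laufenRec level ix iy pos f =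
        (if countSteps level (pyAt pos 0) (pyAt pos 1) ix iy 0 f = 0 then pos
         else [pyAt pos 0 + countSteps level (pyAt pos 0) (pyAt pos 1) ix iy 0 f * ix,
               pyAt pos 1 + countSteps level (pyAt pos 0) (pyAt pos 1) ix iy 0 f * iy]) := by
  intro f
  induction f with
  | zero => intro pos; simp [laufenRec, countSteps]
  | succ f ih =>
    intro pos
    simp only [laufenRec, countSteps]
    have hn0 : pyAt [pyAt pos 0 + ix, pyAt pos 1 + iy] 0 = pyAt pos 0 + ix := by
      simp [pyAt, PySem.List.pyGetD]
    have hn1 : pyAt [pyAt pos 0 + ix, pyAt pos 1 + iy] 1 = pyAt pos 1 + iy := by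
      simp [pyAt, PySem.List.pyGetD]
    have hz : getZelle level [pyAt pos 0 + ix, pyAt pos 1 + iy]
        = pyAt (rowAt level (pyAt pos 1 + iy)) (pyAt pos 0 + ix) := by
      simp [getZelle, hn0, hn1]
    have hcs : pyAt pos 0 + (0 + 1) * ix = pyAt pos 0 + ix := by ring
    have hcs' : pyAt pos 1 + (0 + 1) * iy = pyAt pos 1 + iy := by ring
    rw [hn0, hn1, hz, hcs, hcs']
    by_cases hr : (0 ≤ pyAt pos 0 + ix ∧ pyAt pos 0 + ix < 8) ∧
        (0 ≤ pyAt pos 1 + iy ∧ pyAt pos 1 + iy < 8)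
    · by_cases hc : pyAt (rowAt level (pyAt pos 1 + iy)) (pyAt pos 0 + ix) = 1
      · -- wall directly ahead: both stop at pos
        have hcond : ¬(0 ≤ pyAt pos 0 + ix ∧ pyAt pos 0 + ix < 8 ∧
            0 ≤ pyAt pos 1 + iy ∧ pyAt pos 1 + iy < 8 ∧
            pyAt (rowAt level (pyAt pos 1 + iy)) (pyAt pos 0 + ix) ≠ 1) := by tauto
        rw [if_neg (by tauto), if_pos (by simp [hc]), if_neg hcond]
        simp
      · -- free cell ahead: A recurses, B counts one more step
        have hcond : (0 ≤ pyAt pos 0 + ix ∧ pyAt pos 0 + ix < 8 ∧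
            0 ≤ pyAt pos 1 + iy ∧ pyAt pos 1 + iy < 8 ∧
            pyAt (rowAt level (pyAt pos 1 + iy)) (pyAt pos 0 + ix) ≠ 1) := by tauto
        rw [if_neg (by tauto), if_neg (by simp [hc]), if_pos hcond]
        rw [ih [pyAt pos 0 + ix, pyAt pos 1 + iy], hn0, hn1]
        rw [countSteps_shift level ix iy f (0 + 1) (pyAt pos 0) (pyAt pos 1), hcs, hcs']
        set c := countSteps level (pyAt pos 0 + ix) (pyAt pos 1 + iy) ix iy 0 f with hcdef
        have hcge : (0 : Int) ≤ c :=
          countSteps_ge level (pyAt pos 0 + ix) (pyAt pos 1 + iy) ix iy f 0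
        rw [if_neg (show 0 + 1 + c ≠ 0 by omega)]
        by_cases hc0 : c = 0
        · rw [if_pos hc0, hc0]
          simp only [List.cons.injEq, and_true]
          exact ⟨by ring, by ring⟩
        · rw [if_neg hc0]
          simp only [List.cons.injEq, and_true]
          exact ⟨by ring, by ring⟩
    · -- next cell out of the board: both stop at pos
      have hcond : ¬(0 ≤ pyAt pos 0 + ix ∧ pyAt pos 0 + ix < 8 ∧
          0 ≤ pyAt pos 1 + iy ∧ pyAt pos 1 + iy < 8 ∧
          pyAt (rowAt level (pyAt pos 1 + iy)) (pyAt pos 0 + ix) ≠ 1) := by tauto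
      rw [if_pos (by tauto), if_neg hcond]
      simp

-- ===== VERDICT (by name: the statement is the Claim_ definition above) =====
theorem laufen_spec : Claim_equal_laufen := by
  intro level pos richtung _ _
  unfold Spec_laufen laufen laufen_alt
  exact laufenRec_eq_count level _ _ 20 pos
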